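-- pv_equiv track=rewrite | github.com/Obryvalin/lbki_join | lbki_join.py | join_data
-- ===== SOURCE A (Python) =====
-- from typing import List, Dict, Any, Tuple, Optional
--
-- def join_data(
--     left_data: List[Dict[str, str]],
--     right_data: List[Dict[str, str]],
--     left_key: str,
--     right_key: str,
--     join_type: str = 'inner'
-- ) -> List[Dict[str, str]]:
--     """
--     Выполняет JOIN операции.
--     Поддерживает: inner, left, right, outer.
--     Ключи могут отличаться по названию.
--     """
--     result = []
--
--     # Индекс правой таблицы по ключу
--     right_index = {}
--     for row in right_data:
--         key = row.get(right_key, '')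
--         if key not in right_index:
--             right_index[key] = []
--         right_index[key].append(row)
--
--     all_left_keys = set(row.get(left_key, '') for row in left_data)
--     all_right_keys = set(right_index.keys())
--     common_keys = all_left_keys & all_right_keys
--
--     for left_row in left_data:
--         lkey = left_row.get(left_key, '')
--
--         if join_type == 'inner':
--             if lkey in common_keys:
--                 for rrow in right_index.get(lkey, []):
--                     result.append({**left_row, **rrow})
--
--         elif join_type == 'left':
--             if lkey in right_index:
--                 for rrow in right_index[lkey]:
--                     result.append({**left_row, **rrow})
--             else:
--                 merged = {**left_row}
--                 merged.update({k: '' for k in right_data[0].keys()})  # Пустые поля справа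
--                 result.append(merged)
--
--         elif join_type == 'right':
--             if lkey in right_index:
--                 for rrow in right_index[lkey]:
--                     result.append({**left_row, **rrow})
--             else:
--                 # Обработка случая, когда нет совпадений слева — добавляем только правые строки позже
--                 pass
--
--     # Для RIGHT и OUTER отдельно обрабатываем правые строки без совпадений
--     if join_type in ('right', 'outer'):
--         for rrow in right_data:
--             rkey = rrow.get(right_key, '')
--             if rkey not in all_left_keys or join_type == 'outer':
--                 matched = False
--                 for lrow in left_data:
--                     if lrow.get(left_key, '') == rkey:
--                         result.append({**lrow, **rrow})
--                         matched = True
--                 if not matched: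
--                     merged = {k: '' for k in left_data[0].keys()} if left_data else {}
--                     merged.update(rrow)
--                     result.append(merged)
--
--     if join_type == 'outer':
--         # Уже обработано выше
--         pass
--
--     return result
-- ===== SOURCE B (Python) =====
-- def join_data(left_data, right_data, left_key, right_key, join_type='inner'):
--     # Hash-index BOTH tables by key once; each join type gets its own loop over the indexes.
--     def index(rows, key):
--         idx = {}
--         for row in rows:
--             idx.setdefault(row.get(key, ''), []).append(row)
--         return idx
--
--     right_index = index(right_data, right_key)
--     result = []
--
--     if join_type == 'inner':
--         for lrow in left_data:
--             for rrow in right_index.get(lrow.get(left_key, ''), []):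
--                 result.append({**lrow, **rrow})
--
--     elif join_type == 'left':
--         blank_right = {k: '' for k in right_data[0]} if right_data else {}
--         for lrow in left_data:
--             matches = right_index.get(lrow.get(left_key, ''))
--             if matches is not None:
--                 for rrow in matches:
--                     result.append({**lrow, **rrow})
--             else:
--                 result.append({**lrow, **blank_right})
--
--     elif join_type == 'right':
--         left_index = index(left_data, left_key)
--         for lrow in left_data:
--             for rrow in right_index.get(lrow.get(left_key, ''), []):
--                 result.append({**lrow, **rrow})
--         blank_left = {k: '' for k in left_data[0]} if left_data else {}
--         for rrow in right_data:
--             if rrow.get(right_key, '') not in left_index: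
--                 result.append({**blank_left, **rrow})
--
--     elif join_type == 'outer':
--         left_index = index(left_data, left_key)
--         blank_left = {k: '' for k in left_data[0]} if left_data else {}
--         for rrow in right_data:
--             matches = left_index.get(rrow.get(right_key, ''))
--             if matches is not None:
--                 for lrow in matches:
--                     result.append({**lrow, **rrow})
--             else:
--                 result.append({**blank_left, **rrow})
--
--     return result
-- ===== Notes on version B (the rewrite author's own statement) =====
-- stated objective: alternative
-- what changed: B hash-indexes the left table by key as well (one dict-of-lists per table) and dispatches once on join_type into a dedicated loop per join type, replacing A's single shared left loop, its common_keys set intersection, and its per-right-row rescan of left_data in the right/outer paths.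
-- crash fix: On a left join with an empty right table and a nonempty left table A raises IndexError (right_data[0]); B returns the left rows unchanged. — e.g. on join_data([[("id", "1"), ("x", "a")]], [], "id", "id", "left"): A raises IndexError, B returns [[("id", "1"), ("x", "a")]]
import Mathlib
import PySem

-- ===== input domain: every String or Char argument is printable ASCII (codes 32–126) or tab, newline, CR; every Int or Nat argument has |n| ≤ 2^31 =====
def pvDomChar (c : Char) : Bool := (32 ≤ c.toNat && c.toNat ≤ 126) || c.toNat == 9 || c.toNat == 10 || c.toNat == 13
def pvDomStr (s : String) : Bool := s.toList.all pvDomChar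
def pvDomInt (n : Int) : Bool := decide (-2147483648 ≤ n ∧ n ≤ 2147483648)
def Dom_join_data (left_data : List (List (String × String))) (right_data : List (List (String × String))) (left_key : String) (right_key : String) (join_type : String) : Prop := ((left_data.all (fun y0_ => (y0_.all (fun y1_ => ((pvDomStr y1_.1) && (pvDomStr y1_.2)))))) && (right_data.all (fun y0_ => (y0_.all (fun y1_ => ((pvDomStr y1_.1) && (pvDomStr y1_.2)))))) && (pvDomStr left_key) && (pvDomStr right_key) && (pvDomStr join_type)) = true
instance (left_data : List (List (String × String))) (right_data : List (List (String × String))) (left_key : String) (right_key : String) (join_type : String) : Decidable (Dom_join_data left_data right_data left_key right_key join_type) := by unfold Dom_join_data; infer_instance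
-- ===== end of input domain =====

-- B hash-indexes BOTH tables by key and dispatches once on join_type into one dedicated loop
-- per join type (no per-right-row rescan of left_data); return values agree wherever A returns.

-- Rows arrive as association lists standing for Python dicts; both Pythons receive real dicts,
-- so both ports view a row through Python's dict construction (later duplicate keys overwrite).
def pvRow (r : List (String × String)) : PySem.Dict String String := PySem.Dict.ofList r

-- {**l, **r}
def pvMerge (l r : PySem.Dict String String) : PySem.Dict String String := PySem.Dict.update l r.items

-- ===== PORT A =====
def join_data (left_data : List (List (String × String))) (right_data : List (List (String × String))) (left_key : String) (right_key : String) (join_type : String) : List (List (String × String)) :=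
  let right_index : PySem.Dict String (List (PySem.Dict String String)) :=
    right_data.foldl (fun d row =>
      let key := (pvRow row).getD right_key ""
      let d1 := if d.contains key then d else d.insert key []
      d1.insert key (d1.getD key [] ++ [pvRow row])) PySem.Dict.empty
  let all_left_keys : PySem.Set String :=
    PySem.Set.ofList (left_data.map (fun row => (pvRow row).getD left_key ""))
  let all_right_keys : PySem.Set String := PySem.Set.ofList right_index.keys
  let common_keys : PySem.Set String := PySem.Set.inter all_left_keys all_right_keys
  let result : List (PySem.Dict String String) :=
    left_data.foldl (fun result left_row =>
      let lrow := pvRow left_row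
      let lkey := lrow.getD left_key ""
      if join_type == "inner" then
        if common_keys.contains lkey then
          (right_index.getD lkey []).foldl (fun res rrow => res ++ [pvMerge lrow rrow]) result
        else result
      else if join_type == "left" then
        if right_index.contains lkey then
          (right_index.getD lkey []).foldl (fun res rrow => res ++ [pvMerge lrow rrow]) result
        else
          match right_data with
          | [] => result   -- Python raises IndexError on right_data[0] here; excluded by Pre_
          | r0 :: _ => result ++ [pvMerge lrow (PySem.Dict.ofList ((pvRow r0).keys.map (fun k => (k, ""))))]
      else if join_type == "right" then
        if right_index.contains lkey then
          (right_index.getD lkey []).foldl (fun res rrow => res ++ [pvMerge lrow rrow]) result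
        else result
      else result) []
  let result :=
    if join_type == "right" || join_type == "outer" then
      right_data.foldl (fun result rrow_l =>
        let rrow := pvRow rrow_l
        let rkey := rrow.getD right_key ""
        if !(all_left_keys.contains rkey) || join_type == "outer" then
          let st := left_data.foldl (fun (st : List (PySem.Dict String String) × Bool) lrow_l =>
            if (pvRow lrow_l).getD left_key "" == rkey then
              (st.1 ++ [pvMerge (pvRow lrow_l) rrow], true)
            else st) (result, false)
          if st.2 then st.1
          else
            let merged := match left_data with
              | [] => PySem.Dict.empty
              | l0 :: _ => PySem.Dict.ofList ((pvRow l0).keys.map (fun k => (k, "")))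
            st.1 ++ [pvMerge merged rrow]
        else result) result
    else result
  result.map (fun d => d.items)

-- ===== PORT B =====
-- idx.setdefault(row.get(key, ''), []).append(row)
def pvIndex (rows : List (List (String × String))) (key : String) : PySem.Dict String (List (PySem.Dict String String)) :=
  rows.foldl (fun d row => d.modify ((pvRow row).getD key "") [] (· ++ [pvRow row])) PySem.Dict.empty

def join_data_alt (left_data : List (List (String × String))) (right_data : List (List (String × String))) (left_key : String) (right_key : String) (join_type : String) : List (List (String × String)) :=
  let right_index := pvIndex right_data right_key
  let result : List (PySem.Dict String String) :=
    if join_type == "inner" then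
      left_data.foldl (fun res lrow_l =>
        let lrow := pvRow lrow_l
        (right_index.getD (lrow.getD left_key "") []).foldl (fun res rrow => res ++ [pvMerge lrow rrow]) res) []
    else if join_type == "left" then
      let blank_right := match right_data with
        | [] => PySem.Dict.empty
        | r0 :: _ => PySem.Dict.ofList ((pvRow r0).keys.map (fun k => (k, "")))
      left_data.foldl (fun res lrow_l =>
        let lrow := pvRow lrow_l
        match right_index.get? (lrow.getD left_key "") with
        | some ms => ms.foldl (fun res rrow => res ++ [pvMerge lrow rrow]) res
        | none => res ++ [pvMerge lrow blank_right]) []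
    else if join_type == "right" then
      let left_index := pvIndex left_data left_key
      let part1 := left_data.foldl (fun res lrow_l =>
        let lrow := pvRow lrow_l
        (right_index.getD (lrow.getD left_key "") []).foldl (fun res rrow => res ++ [pvMerge lrow rrow]) res) []
      let blank_left := match left_data with
        | [] => PySem.Dict.empty
        | l0 :: _ => PySem.Dict.ofList ((pvRow l0).keys.map (fun k => (k, "")))
      right_data.foldl (fun res rrow_l =>
        let rrow := pvRow rrow_l
        if left_index.contains (rrow.getD right_key "") then res
        else res ++ [pvMerge blank_left rrow]) part1
    else if join_type == "outer" then
      let left_index := pvIndex left_data left_key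
      let blank_left := match left_data with
        | [] => PySem.Dict.empty
        | l0 :: _ => PySem.Dict.ofList ((pvRow l0).keys.map (fun k => (k, "")))
      right_data.foldl (fun res rrow_l =>
        let rrow := pvRow rrow_l
        match left_index.get? (rrow.getD right_key "") with
        | some ms => ms.foldl (fun res lrow => res ++ [pvMerge lrow rrow]) res
        | none => res ++ [pvMerge blank_left rrow]) []
    else []
  result.map (fun d => d.items)

-- ===== PRECONDITION & SPEC =====
-- Pre_ excludes exactly the inputs where A raises IndexError (left join, empty right table,
-- nonempty left table: every left row is unmatched and A evaluates right_data[0]).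
def Pre_join_data (left_data : List (List (String × String))) (right_data : List (List (String × String))) (left_key : String) (right_key : String) (join_type : String) : Prop :=
  join_type = "left" → right_data = [] → left_data = []
instance (left_data : List (List (String × String))) (right_data : List (List (String × String))) (left_key : String) (right_key : String) (join_type : String) : Decidable (Pre_join_data left_data right_data left_key right_key join_type) := by unfold Pre_join_data; infer_instance

def pvWitness_join_data : (List (List (String × String))) × (List (List (String × String))) × String × String × String :=
  ([[("id", "1"), ("x", "a")]], [[("id", "1"), ("y", "b")]], "id", "id", "left")

-- On left joins with an empty right table and a nonempty left table A raises IndexError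
-- (right_data[0]); B returns the left rows unchanged.
def Raises_join_data (left_data : List (List (String × String))) (right_data : List (List (String × String))) (left_key : String) (right_key : String) (join_type : String) : Prop :=
  join_type = "left" ∧ right_data = [] ∧ left_data ≠ []
instance (left_data : List (List (String × String))) (right_data : List (List (String × String))) (left_key : String) (right_key : String) (join_type : String) : Decidable (Raises_join_data left_data right_data left_key right_key join_type) := by unfold Raises_join_data; infer_instance
def pvRaiseWitness_join_data : (List (List (String × String))) × (List (List (String × String))) × String × String × String :=
  ([[("id", "1"), ("x", "a")]], [], "id", "id", "left")
def pvRaiseWitnessOut_join_data : List (List (String × String)) := [[("id", "1"), ("x", "a")]]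

def Spec_join_data (left_data : List (List (String × String))) (right_data : List (List (String × String))) (left_key : String) (right_key : String) (join_type : String) (out : List (List (String × String))) : Prop := out = join_data_alt left_data right_data left_key right_key join_type
instance (left_data : List (List (String × String))) (right_data : List (List (String × String))) (left_key : String) (right_key : String) (join_type : String) (out : List (List (String × String))) : Decidable (Spec_join_data left_data right_data left_key right_key join_type out) := by unfold Spec_join_data; infer_instance

-- ===== CLAIM (what is proved, stated in full; the proofs are below) =====
def Claim_equal_join_data : Prop := ∀ (left_data : List (List (String × String))) (right_data : List (List (String × String))) (left_key : String) (right_key : String) (join_type : String), Dom_join_data left_data right_data left_key right_key join_type → Pre_join_data left_data right_data left_key right_key join_type → Spec_join_data left_data right_data left_key right_key join_type (join_data left_data right_data left_key right_key join_type)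

def Claim_raises_join_data : Prop := (∀ (left_data : List (List (String × String))) (right_data : List (List (String × String))) (left_key : String) (right_key : String) (join_type : String), Dom_join_data left_data right_data left_key right_key join_type → Raises_join_data left_data right_data left_key right_key join_type → ¬ Pre_join_data left_data right_data left_key right_key join_type) ∧ (Dom_join_data (pvRaiseWitness_join_data.1) (pvRaiseWitness_join_data.2.1) (pvRaiseWitness_join_data.2.2.1) (pvRaiseWitness_join_data.2.2.2.1) (pvRaiseWitness_join_data.2.2.2.2) ∧ Raises_join_data (pvRaiseWitness_join_data.1) (pvRaiseWitness_join_data.2.1) (pvRaiseWitness_join_data.2.2.1) (pvRaiseWitness_join_data.2.2.2.1) (pvRaiseWitness_join_data.2.2.2.2) ∧ join_data_alt (pvRaiseWitness_join_data.1) (pvRaiseWitness_join_data.2.1) (pvRaiseWitness_join_data.2.2.1) (pvRaiseWitness_join_data.2.2.2.1) (pvRaiseWitness_join_data.2.2.2.2) = pvRaiseWitnessOut_join_data)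

-- ===== LEMMAS AND PROOFS =====

theorem dict_insert_insert {κ ν : Type} [BEq κ] [LawfulBEq κ] (d : PySem.Dict κ ν) (k : κ) (v w : ν) :
    (d.insert k v).insert k w = d.insert k w := by
  apply PySem.Dict.ext
  by_cases h : d.contains k = true
  · rw [PySem.Dict.items_insert_of_contains _ _ h,
        PySem.Dict.items_insert_of_contains _ _ (by
          simp only [PySem.Dict.contains, PySem.Dict.items_insert_of_contains _ _ h] at h ⊢
          simp only [List.any_map, List.any_eq_true] at h ⊢
          obtain ⟨p, hp, he⟩ := h
          exact ⟨p, hp, by simp [he]⟩),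
        PySem.Dict.items_insert_of_contains _ _ h]
    simp only [List.map_map]
    apply List.map_congr_left
    intro p _
    by_cases hp : (p.1 == k) = true <;> simp [Function.comp, hp]
  · have h' : d.contains k = false := by simpa using h
    rw [PySem.Dict.items_insert_of_not_contains _ _ h']
    rw [PySem.Dict.items_insert_of_contains _ _ (by
          simp [PySem.Dict.contains, PySem.Dict.items_insert_of_not_contains _ _ h'])]
    rw [PySem.Dict.items_insert_of_not_contains _ _ h']
    rw [List.map_append]
    congr 1
    · conv_rhs => rw [← List.map_id' (PySem.Dict.items d)]
      apply List.map_congr_left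
      intro p hp
      have : (p.1 == k) = false := by
        simp only [PySem.Dict.contains, List.any_eq_true] at h
        simp only [Bool.eq_false_iff]
        intro he; exact h ⟨p, hp, he⟩
      simp [this]
    · simp

-- A's "ensure key, then append" on its right index is one dict-of-lists modify step
-- (B's setdefault(...).append(...)).
theorem indexStep_eq (d : PySem.Dict String (List (PySem.Dict String String))) (k : String) (x : PySem.Dict String String) :
    (if d.contains k then d else d.insert k []).insert k
      ((if d.contains k then d else d.insert k []).getD k [] ++ [x]) = d.modify k [] (· ++ [x]) := by
  by_cases h : d.contains k = true
  · simp only [h, if_true, PySem.Dict.modify]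
  · simp only [h, Bool.false_eq_true, if_false, PySem.Dict.modify,
      PySem.Dict.getD_insert_self, dict_insert_insert]
    rw [PySem.Dict.getD_eq_get?_getD, (PySem.Dict.get?_eq_none_iff_contains _ _).mpr (by simpa using h)]
    rfl

-- A's right_index construction builds the same dict as B's pvIndex.
theorem indexA_eq (rows : List (List (String × String))) (key : String) :
    rows.foldl (fun d row =>
      (if d.contains ((pvRow row).getD key "") then d else d.insert ((pvRow row).getD key "") []).insert
        ((pvRow row).getD key "")
        ((if d.contains ((pvRow row).getD key "") then d
          else d.insert ((pvRow row).getD key "") []).getD ((pvRow row).getD key "") [] ++ [pvRow row]))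
      PySem.Dict.empty = pvIndex rows key := by
  unfold pvIndex
  exact PySem.List.foldl_congr_mem _ _ _ _ (fun d row _ => indexStep_eq d _ _)

theorem pvIndex_getD (rows : List (List (String × String))) (key c : String) :
    (pvIndex rows key).getD c [] = (rows.filter (fun r => (pvRow r).getD key "" == c)).map pvRow := by
  unfold pvIndex
  have : rows.foldl (fun d row => d.modify ((pvRow row).getD key "") [] (· ++ [pvRow row])) PySem.Dict.empty
      = (rows.map (fun row => ((pvRow row).getD key "", pvRow row))).foldl (fun d p => d.modify p.1 [] (· ++ [p.2])) PySem.Dict.empty := by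
    rw [List.foldl_map]
  rw [this, PySem.Dict.getD_foldl_modify_append]
  simp [List.filter_map, List.map_map, Function.comp_def]

theorem pvIndex_contains (rows : List (List (String × String))) (key c : String) :
    (pvIndex rows key).contains c = true ↔ c ∈ rows.map (fun r => (pvRow r).getD key "") := by
  unfold pvIndex
  rw [PySem.Dict.contains_iff_mem_keys,
      PySem.Dict.keys_foldl_modify_key rows (fun row => (pvRow row).getD key "") [] (fun _ row => (· ++ [pvRow row])),
      PySem.Dict.keys_empty, PySem.Set.update_nil_left, PySem.Set.mem_ofList]

-- ===== VERDICT =====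
theorem join_data_spec : Claim_equal_join_data := by
  intro L R lk rk jt _hdom hpre
  unfold Spec_join_data
  simp only [join_data, join_data_alt, indexA_eq]
  by_cases h1 : jt = "inner"
  · subst h1
    simp only [BEq.rfl, if_true, String.reduceBEq, Bool.or_self]
    congr 1
    apply PySem.List.foldl_congr_mem
    intro acc row hrow
    by_cases hc : (pvIndex R rk).contains ((pvRow row).getD lk "") = true
    · rw [if_pos]
      rw [PySem.Set.contains_iff, PySem.Set.mem_inter]
      exact ⟨(PySem.Set.mem_ofList _ _).mpr (List.mem_map_of_mem hrow),
             (PySem.Set.mem_ofList _ _).mpr ((PySem.Dict.contains_iff_mem_keys _ _).mp hc)⟩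
    · rw [PySem.Dict.getD_of_not_contains (pvIndex R rk) (k := (pvRow row).getD lk "") [] (by simpa using hc), if_neg]
      · simp
      · rw [PySem.Set.contains_iff, PySem.Set.mem_inter]
        rintro ⟨-, hmem⟩
        exact hc ((PySem.Dict.contains_iff_mem_keys _ _).mpr ((PySem.Set.mem_ofList _ _).mp hmem))
  by_cases h2 : jt = "left"
  · subst h2
    simp only [String.reduceBEq, Bool.false_eq_true, if_false, BEq.rfl, if_true, Bool.or_self]
    congr 1
    rcases R with _ | ⟨r0, rest⟩
    · have hL : L = [] := hpre rfl rfl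
      subst hL; rfl
    · apply PySem.List.foldl_congr_mem
      intro acc row hrow
      cases hq : (pvIndex (r0 :: rest) rk).get? ((pvRow row).getD lk "") with
      | some ms =>
        have hc : (pvIndex (r0 :: rest) rk).contains ((pvRow row).getD lk "") = true := by
          rw [PySem.Dict.contains_eq_isSome_get?, hq]; rfl
        rw [if_pos hc, PySem.Dict.getD_of_get?_eq_some _ _ hq]
      | none =>
        have hc : (pvIndex (r0 :: rest) rk).contains ((pvRow row).getD lk "") = false :=
          (PySem.Dict.get?_eq_none_iff_contains _ _).mp hq
        rw [if_neg (by simp [hc])]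
  · by_cases h3 : jt = "right"
    · subst h3
      simp only [String.reduceBEq, Bool.false_eq_true, if_false, BEq.rfl, if_true,
        Bool.or_false]
      congr 1
      have hphase : L.foldl (fun (result : List (PySem.Dict String String)) left_row =>
          if (pvIndex R rk).contains ((pvRow left_row).getD lk "") = true then
            List.foldl (fun res rrow => res ++ [pvMerge (pvRow left_row) rrow]) result
              ((pvIndex R rk).getD ((pvRow left_row).getD lk "") [])
          else result) []
        = L.foldl (fun (res : List (PySem.Dict String String)) lrow_l =>
            List.foldl (fun res rrow => res ++ [pvMerge (pvRow lrow_l) rrow]) res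
              ((pvIndex R rk).getD ((pvRow lrow_l).getD lk "") [])) [] := by
        apply PySem.List.foldl_congr_mem
        intro acc row _
        by_cases hc : (pvIndex R rk).contains ((pvRow row).getD lk "") = true
        · rw [if_pos hc]
        · rw [if_neg hc,
            PySem.Dict.getD_of_not_contains (pvIndex R rk) (k := (pvRow row).getD lk "") []
              (by simpa using hc)]
          rfl
      rw [hphase]
      apply PySem.List.foldl_congr_mem
      intro acc rr _
      by_cases hm : ((pvRow rr).getD rk "") ∈ L.map (fun r => (pvRow r).getD lk "")
      · have hcl : (pvIndex L lk).contains ((pvRow rr).getD rk "") = true :=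
          (pvIndex_contains _ _ _).mpr hm
        have hsl : (PySem.Set.ofList (L.map (fun r => (pvRow r).getD lk ""))).contains
            ((pvRow rr).getD rk "") = true :=
          (PySem.Set.contains_iff _ _).mpr ((PySem.Set.mem_ofList _ _).mpr hm)
        rw [if_neg (by simpa using hm), if_pos hcl]
      · have hcl : (pvIndex L lk).contains ((pvRow rr).getD rk "") = false := by
          rw [Bool.eq_false_iff]; intro h; exact hm ((pvIndex_contains _ _ _).mp h)
        have hsl : (PySem.Set.ofList (L.map (fun r => (pvRow r).getD lk ""))).contains
            ((pvRow rr).getD rk "") = false := by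
          rw [Bool.eq_false_iff]; intro h
          exact hm ((PySem.Set.mem_ofList _ _).mp ((PySem.Set.contains_iff _ _).mp h))
        rw [if_pos (by simpa using hm)]
        rw [PySem.List.foldl_congr_mem L _
            (fun (st : List (PySem.Dict String String) × Bool) (_ : List (String × String)) => st)
            (acc, false)
            (by
              intro st x hx
              rw [if_neg]
              simp only [beq_iff_eq]
              intro he
              exact hm (he ▸ List.mem_map_of_mem hx)),
          PySem.List.foldl_ignore]
        rw [if_neg (by simp), hcl]
        simp
    · by_cases h4 : jt = "outer"
      · subst h4
        simp only [String.reduceBEq, Bool.false_eq_true, if_false, BEq.rfl, if_true,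
          Bool.or_true, PySem.List.foldl_ignore]
        congr 1
        have hsplit : ∀ (rr : List (String × String)) (acc : List (PySem.Dict String String)),
            L.foldl (fun (st : List (PySem.Dict String String) × Bool) lrow_l =>
              if ((pvRow lrow_l).getD lk "" == (pvRow rr).getD rk "") = true then
                (st.1 ++ [pvMerge (pvRow lrow_l) (pvRow rr)], true)
              else st) (acc, false)
            = (acc ++ (L.filter (fun x => (pvRow x).getD lk "" == (pvRow rr).getD rk "")).map
                  (fun x => pvMerge (pvRow x) (pvRow rr)),
               L.any (fun x => (pvRow x).getD lk "" == (pvRow rr).getD rk "")) := by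
          intro rr acc
          rw [PySem.List.foldl_congr_mem L _
              (fun (s : List (PySem.Dict String String) × Bool) e =>
                ((if ((pvRow e).getD lk "" == (pvRow rr).getD rk "") = true then
                    s.1 ++ [pvMerge (pvRow e) (pvRow rr)] else s.1),
                 (if ((pvRow e).getD lk "" == (pvRow rr).getD rk "") = true then true else s.2)))
              (acc, false) (by
              intro st x _
              by_cases h : ((pvRow x).getD lk "" == (pvRow rr).getD rk "") = true <;> simp [h])]
          rw [PySem.List.foldl_prod_mk
              (f := fun (a : List (PySem.Dict String String)) e =>
                if ((pvRow e).getD lk "" == (pvRow rr).getD rk "") = true then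
                  a ++ [pvMerge (pvRow e) (pvRow rr)] else a)
              (g := fun (b : Bool) e =>
                if ((pvRow e).getD lk "" == (pvRow rr).getD rk "") = true then true else b)]
          rw [PySem.List.foldl_append_if, PySem.List.foldl_if_true_eq]
          simp
        apply PySem.List.foldl_congr_mem
        intro acc rr _
        simp only [hsplit]
        cases hq : (pvIndex L lk).get? ((pvRow rr).getD rk "") with
        | some ms =>
          have hc : (pvIndex L lk).contains ((pvRow rr).getD rk "") = true := by
            rw [PySem.Dict.contains_eq_isSome_get?, hq]; rfl
          have hmem := (pvIndex_contains _ _ _).mp hc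
          have hany : L.any (fun x => (pvRow x).getD lk "" == (pvRow rr).getD rk "") = true := by
            rw [List.any_eq_true]
            obtain ⟨x, hx, he⟩ := List.mem_map.mp hmem
            exact ⟨x, hx, by simp [he]⟩
          rw [if_pos hany]
          have hms : ms = (L.filter (fun r => (pvRow r).getD lk "" == (pvRow rr).getD rk "")).map pvRow := by
            rw [← pvIndex_getD, PySem.Dict.getD_of_get?_eq_some _ _ hq]
          simp only [hms, PySem.List.foldl_append_singleton_eq_map, List.map_map]
          rfl
        | none =>
          have hc : (pvIndex L lk).contains ((pvRow rr).getD rk "") = false :=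
            (PySem.Dict.get?_eq_none_iff_contains _ _).mp hq
          have hnm : ∀ x ∈ L, ¬ (pvRow x).getD lk "" = (pvRow rr).getD rk "" := by
            intro x hx he
            exact absurd ((pvIndex_contains _ _ _).mpr (List.mem_map.mpr ⟨x, hx, he⟩))
              (by simp [hc])
          have hany : L.any (fun x => (pvRow x).getD lk "" == (pvRow rr).getD rk "") = false := by
            rw [Bool.eq_false_iff]
            intro h
            obtain ⟨x, hx, he⟩ := List.any_eq_true.mp h
            exact hnm x hx (by simpa using he)
          have hfil : L.filter (fun x => (pvRow x).getD lk "" == (pvRow rr).getD rk "") = [] := by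
            rw [List.filter_eq_nil_iff]
            intro x hx he
            exact hnm x hx (by simpa using he)
          rw [if_neg (by simp [hany]), hfil]
          simp only [List.map_nil, List.append_nil]
      · -- no recognised join type: both return []
        simp only [beq_iff_eq, h1, h2, h3, h4, if_false, PySem.List.foldl_ignore,
          List.map_nil]
        rw [if_neg (by simp [h3, h4])]
        rfl

@[simp] theorem join_data_raises : Claim_raises_join_data := by
  unfold Claim_raises_join_data
  constructor
  · intro L R lk rk jt _ hr hpre
    exact hr.2.2 (hpre hr.1 hr.2.1)
  · exact ⟨by decide, by decide, by decide⟩
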